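-- pv_equiv track=rewrite | github.com/jdold07/codewars-solutions | 6_Kyu_Kata/a_rule_of_divisibility_by_13/Python/a_rule_of_divisibility_by_13.py | thirt
-- ===== SOURCE A (Python) =====
-- def thirt(n):
--     pattern = [1, 10, 9, 12, 3, 4]
--     sum = 0
--
--     while True:
--         current_sum = 0
--         for index, digit in enumerate(str(n)[::-1]):
--             current_index = index % len(pattern)
--             current_sum += int(digit) * pattern[current_index]
--
--         if sum == current_sum:
--             return sum
--
--         sum = current_sum
--         n = current_sum
-- ===== SOURCE B (Python) =====
-- def thirt(n):
--     # purely arithmetic: extract digits with % and //, cycling weight 10^i mod 13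
--     # maintained by w = w * 10 % 13 (no string, no pattern table); recurse to the fixed point
--     s, m, w = 0, n, 1
--     while m > 0:
--         s += (m % 10) * w
--         m //= 10
--         w = w * 10 % 13
--     return s if s == n else thirt(s)
-- ===== Notes on version B (the rewrite author's own statement) =====
-- stated objective: alternative
-- what changed: replaces string conversion, reversal and the [1,10,9,12,3,4] pattern table by pure integer arithmetic (digits via % and //, cycling weight maintained as w = w*10 % 13) and the while-True fixed-point loop with sum/n bookkeeping by tail recursion
import Mathlib
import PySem

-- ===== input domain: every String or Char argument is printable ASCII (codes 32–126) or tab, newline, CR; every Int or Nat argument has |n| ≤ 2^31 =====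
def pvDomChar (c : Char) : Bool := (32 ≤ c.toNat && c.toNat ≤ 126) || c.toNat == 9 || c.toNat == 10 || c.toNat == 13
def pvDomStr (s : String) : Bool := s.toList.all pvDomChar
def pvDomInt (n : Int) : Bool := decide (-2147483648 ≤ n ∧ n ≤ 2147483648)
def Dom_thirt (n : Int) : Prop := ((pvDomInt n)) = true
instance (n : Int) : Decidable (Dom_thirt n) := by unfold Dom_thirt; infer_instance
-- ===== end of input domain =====

-- B drops the string conversion, the reversal and the [1,10,9,12,3,4] table entirely:
-- digits come from % and //, the cycling weight is maintained arithmetically as w = w*10 % 13,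
-- and the while-True fixed-point loop with sum/n bookkeeping becomes a tail recursion.
-- Equivalence is proved for n ≥ 0 (the Python A raises ValueError on n < 0).

-- ===== PORT A =====
def pvPattern : List Int := [1, 10, 9, 12, 3, 4]

-- inner for-loop of A: enumerate(str(n)[::-1]); int(digit) via PySem.Int.ofChars? (getD 0 is
-- unreachable for n ≥ 0: the digits of str(n) are '0'-'9'); pattern[index % 6] via Python mod +
-- pyGet? (getD 0 unreachable: 0 ≤ i % 6 < 6).
def pvWsumA (n : Int) : Int :=
  (PySem.List.enumerate ((PySem.Int.toChars n).reverse) 0).foldl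
    (fun cs p =>
      cs + ((PySem.Int.ofChars? [p.2]).getD 0) *
        ((PySem.List.pyGet? pvPattern (PySem.Int.mod p.1 6)).getD 0)) 0

-- the 'while True' loop with state (sum, n); fuel makes it total (never exhausted for n ≥ 0:
-- every value below 100 is a fixed point and the weighted sum strictly decreases above 99)
def pvLoopA : Int → Int → Nat → Int
  | _, _, 0 => 0
  | s, n, f + 1 =>
      let cs := pvWsumA n
      if s = cs then s else pvLoopA cs cs f

def thirt (n : Int) : Int := pvLoopA 0 n (n.toNat + 2)

-- ===== PORT B =====
-- B's 'while m > 0' digit loop with state (s, m, w); fuel makes it total (the number of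
-- iterations is the number of digits, so fuel m.toNat + 1 is never exhausted)
def pvDigLoop : Int → Int → Int → Nat → Int
  | s, _, _, 0 => s
  | s, m, w, f + 1 =>
      if 0 < m then
        pvDigLoop (s + (PySem.Int.mod m 10) * w) (PySem.Int.floordiv m 10)
          (PySem.Int.mod (w * 10) 13) f
      else s

-- B's tail recursion 'return s if s == n else thirt(s)', totalised by fuel
def pvGoB : Int → Nat → Int
  | _, 0 => 0
  | n, f + 1 =>
      let s := pvDigLoop 0 n 1 (n.toNat + 1)
      if s = n then s else pvGoB s f

def thirt_alt (n : Int) : Int := pvGoB n (n.toNat + 2)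

-- ===== PRECONDITION & SPEC =====
-- Pre_ excludes n < 0, on which the Python A raises ValueError (int('-') on the reversed string).
def Pre_thirt (n : Int) : Prop := 0 ≤ n
instance (n : Int) : Decidable (Pre_thirt n) := by unfold Pre_thirt; infer_instance
def pvWitness_thirt : Int := 1234

def Spec_thirt (n : Int) (out : Int) : Prop := out = thirt_alt n
instance (n : Int) (out : Int) : Decidable (Spec_thirt n out) := by unfold Spec_thirt; infer_instance

-- ===== CLAIM (what is proved, stated in full; the proofs are below) =====
def Claim_equal_thirt : Prop := ∀ (n : Int), Dom_thirt n → Pre_thirt n → Spec_thirt n (thirt n)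

-- ===== LEMMAS AND PROOFS =====

-- reference weight at digit position i (A's pattern lookup, on the Nat side)
def patAt (i : Nat) : Int := pvPattern.getD (i % 6) 0

-- arithmetic weighted digit sum (the mathematical content of B's digit loop)
def pvT (m : Nat) (w : Int) : Int :=
  if m = 0 then 0 else ((m % 10 : Nat) : Int) * w + pvT (m / 10) (PySem.Int.mod (w * 10) 13)
decreasing_by exact Nat.div_lt_self (Nat.pos_of_ne_zero (by assumption)) (by norm_num)

theorem pvLoopA_succ (s n : Int) (f : Nat) :
    pvLoopA s n (f + 1) = if s = pvWsumA n then s else pvLoopA (pvWsumA n) (pvWsumA n) f := rfl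

theorem pvGoB_succ (n : Int) (f : Nat) :
    pvGoB n (f + 1) =
      if pvDigLoop 0 n 1 (n.toNat + 1) = n then pvDigLoop 0 n 1 (n.toNat + 1)
      else pvGoB (pvDigLoop 0 n 1 (n.toNat + 1)) f := rfl

-- toDigitsCore pulls its accumulator out as a suffix
theorem tdc_acc : ∀ (f n : Nat) (acc : List Char),
    Nat.toDigitsCore 10 f n acc = Nat.toDigitsCore 10 f n [] ++ acc := by
  intro f
  induction f with
  | zero => intro n acc; rfl
  | succ f ih =>
      intro n acc
      simp only [Nat.toDigitsCore]
      by_cases h : n / 10 = 0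
      · simp [h]
      · simp only [h, if_false]
        rw [ih (n / 10) (Nat.digitChar (n % 10) :: acc), ih (n / 10) [Nat.digitChar (n % 10)],
          List.append_assoc]
        rfl

-- toDigitsCore is fuel-independent once the fuel exceeds n
theorem tdc_fuel : ∀ (n f g : Nat), n < f → n < g →
    Nat.toDigitsCore 10 f n [] = Nat.toDigitsCore 10 g n [] := by
  intro n
  induction n using Nat.strong_induction_on with
  | _ n ih =>
      intro f g hf hg
      obtain ⟨f', rfl⟩ : ∃ f', f = f' + 1 := ⟨f - 1, by omega⟩
      obtain ⟨g', rfl⟩ : ∃ g', g = g' + 1 := ⟨g - 1, by omega⟩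
      simp only [Nat.toDigitsCore]
      by_cases h : n / 10 = 0
      · simp [h]
      · have hn : 10 ≤ n := by
          by_contra hc
          exact h (Nat.div_eq_of_lt (by omega))
        have hlt : n / 10 < n := Nat.div_lt_self (by omega) (by norm_num)
        simp only [h, if_false]
        rw [tdc_acc f' (n / 10), tdc_acc g' (n / 10),
          ih (n / 10) hlt f' g' (by omega) (by omega)]

theorem toDigits_small {n : Nat} (h : n < 10) : Nat.toDigits 10 n = [Nat.digitChar n] := by
  have h0 : n / 10 = 0 := Nat.div_eq_of_lt h
  have h1 : n % 10 = n := Nat.mod_eq_of_lt h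
  simp [Nat.toDigits, Nat.toDigitsCore, h0, h1]

theorem toDigits_large {n : Nat} (h : 10 ≤ n) :
    Nat.toDigits 10 n = Nat.toDigits 10 (n / 10) ++ [Nat.digitChar (n % 10)] := by
  have h0 : n / 10 ≠ 0 := by omega
  show Nat.toDigitsCore 10 (n + 1) n [] = _
  simp only [Nat.toDigitsCore, h0, if_false]
  rw [tdc_acc n (n / 10)]
  have hlt : n / 10 < n := Nat.div_lt_self (by omega) (by norm_num)
  rw [tdc_fuel (n / 10) n (n / 10 + 1) (by omega) (by omega)]
  rfl

-- int(d) of a single decimal digit character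
theorem ofChars_digitChar {d : Nat} (h : d < 10) :
    PySem.Int.ofChars? [Nat.digitChar d] = some (d : Int) := by
  interval_cases d <;> decide

-- A's pattern lookup at Int index ↑i % 6 is patAt i
theorem pyGet_pattern (i : Nat) :
    (PySem.List.pyGet? pvPattern (PySem.Int.mod (i : Int) 6)).getD 0 = patAt i := by
  unfold patAt
  rw [show ((6 : Int)) = ((6 : Nat) : Int) from rfl, PySem.Int.mod_natCast,
    PySem.List.pyGet?_natCast]
  have h6 : i % 6 < 6 := Nat.mod_lt _ (by norm_num)
  interval_cases h : i % 6 <;> rfl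

-- the pattern advances exactly as B's weight recurrence w := w*10 % 13
theorem patAt_succ (i : Nat) : patAt (i + 1) = PySem.Int.mod (patAt i * 10) 13 := by
  unfold patAt
  have h6 : i % 6 < 6 := Nat.mod_lt _ (by norm_num)
  have hs : (i + 1) % 6 = (i % 6 + 1) % 6 := by omega
  rw [hs]
  interval_cases h : i % 6 <;> decide

-- main digit lemma: A's enumerate/pattern sum over str(m) reversed is the arithmetic sum pvT
theorem wsum_digits : ∀ (m i : Nat),
    ((PySem.List.enumerate ((Nat.toDigits 10 m).reverse) (i : Int)).map
      (fun p => ((PySem.Int.ofChars? [p.2]).getD 0) *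
        ((PySem.List.pyGet? pvPattern (PySem.Int.mod p.1 6)).getD 0))).sum
      = pvT m (patAt i) := by
  intro m
  induction m using Nat.strong_induction_on with
  | _ m ih =>
      intro i
      by_cases hm : m < 10
      · rw [toDigits_small hm]
        simp only [List.reverse_singleton, PySem.List.enumerate, List.map, List.sum_cons,
          List.sum_nil, add_zero]
        rw [ofChars_digitChar hm, pyGet_pattern i, pvT]
        by_cases h0 : m = 0
        · simp [h0]
        · rw [if_neg h0, Nat.mod_eq_of_lt hm, pvT, if_pos (Nat.div_eq_of_lt hm)]
          simp [mul_comm]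
      · rw [Nat.not_lt] at hm
        rw [toDigits_large hm]
        simp only [List.reverse_append, List.reverse_singleton, List.singleton_append,
          PySem.List.enumerate, List.map, List.sum_cons]
        rw [ofChars_digitChar (Nat.mod_lt _ (by norm_num)), pyGet_pattern i]
        have hcast : (i : Int) + 1 = ((i + 1 : Nat) : Int) := by push_cast; ring
        rw [hcast, ih (m / 10) (Nat.div_lt_self (by omega) (by norm_num)) (i + 1),
          patAt_succ]
        conv_rhs => rw [pvT]
        rw [if_neg (show m ≠ 0 by omega)]
        simp [mul_comm]

-- folding additions of g over l from a is a plus the sum of the mapped list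
theorem foldl_add_map {α : Type} (g : α → Int) :
    ∀ (l : List α) (a : Int), l.foldl (fun cs p => cs + g p) a = a + (l.map g).sum := by
  intro l
  induction l with
  | nil => intro a; simp
  | cons p l ih => intro a; simp [ih, add_assoc]

-- A's weighted sum is the arithmetic sum, for n ≥ 0
theorem wsumA_eq_pvT {n : Int} (h : 0 ≤ n) : pvWsumA n = pvT n.toNat 1 := by
  unfold pvWsumA
  rw [foldl_add_map]
  have hc : PySem.Int.toChars n = Nat.toDigits 10 n.toNat := by
    unfold PySem.Int.toChars
    rw [if_neg (by omega)]
  rw [hc, zero_add]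
  have := wsum_digits n.toNat 0
  simpa [patAt, pvPattern] using this

-- B's digit loop computes the arithmetic sum (fuel m.toNat + 1 always suffices)
theorem digLoop_eq_pvT : ∀ (f : Nat) (m s w : Int), 0 ≤ m → m.toNat < f →
    pvDigLoop s m w f = s + pvT m.toNat w := by
  intro f
  induction f with
  | zero => intro m s w _ hf; omega
  | succ f ih =>
      intro m s w hm hf
      show (if 0 < m then _ else s) = _
      by_cases hpos : 0 < m
      · rw [if_pos hpos]
        have hd : PySem.Int.floordiv m 10 = ((m.toNat / 10 : Nat) : Int) := by
          rw [PySem.Int.floordiv_eq_ediv_of_pos (by norm_num : (0 : Int) < 10)]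
          omega
        have hmod : PySem.Int.mod m 10 = ((m.toNat % 10 : Nat) : Int) := by
          rw [PySem.Int.mod_eq_emod_of_pos (by norm_num : (0 : Int) < 10)]
          omega
        have htn : m.toNat / 10 < f := by
          have : m.toNat / 10 < m.toNat := Nat.div_lt_self (by omega) (by norm_num)
          omega
        rw [hd, ih _ _ _ (by positivity) (by rw [Int.toNat_natCast]; exact htn)]
        rw [Int.toNat_natCast]
        conv_rhs => rw [pvT, if_neg (show m.toNat ≠ 0 by omega)]
        rw [hmod]
        ring
      · rw [if_neg hpos]
        have : m = 0 := by omega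
        subst this
        rw [pvT]
        simp

theorem wsumB_eq_pvT {n : Int} (h : 0 ≤ n) : pvDigLoop 0 n 1 (n.toNat + 1) = pvT n.toNat 1 := by
  rw [digLoop_eq_pvT (n.toNat + 1) n 0 1 h (by omega), zero_add]

theorem wsum_eq {n : Int} (h : 0 ≤ n) : pvWsumA n = pvDigLoop 0 n 1 (n.toNat + 1) := by
  rw [wsumA_eq_pvT h, wsumB_eq_pvT h]

-- the arithmetic sum is nonnegative when the weight is
theorem pvT_nonneg : ∀ (m : Nat) (w : Int), 0 ≤ w → 0 ≤ pvT m w := by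
  intro m
  induction m using Nat.strong_induction_on with
  | _ m ih =>
      intro w hw
      rw [pvT]
      by_cases h : m = 0
      · simp [h]
      · rw [if_neg h]
        have h1 : (0 : Int) ≤ ((m % 10 : Nat) : Int) * w := by positivity
        have h2 : (0 : Int) ≤ PySem.Int.mod (w * 10) 13 := by
          rw [PySem.Int.mod_eq_emod_of_pos (by norm_num : (0 : Int) < 13)]
          exact Int.emod_nonneg _ (by norm_num)
        have h3 := ih (m / 10) (Nat.div_lt_self (Nat.pos_of_ne_zero h) (by norm_num)) _ h2
        omega

theorem wsumB_nonneg {n : Int} (h : 0 ≤ n) : 0 ≤ pvDigLoop 0 n 1 (n.toNat + 1) := by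
  rw [wsumB_eq_pvT h]
  exact pvT_nonneg _ 1 (by norm_num)

-- A's loop, once its state has stabilised to (m, m), is B's recursion
theorem pvLoopA_eq_pvGoB : ∀ (f : Nat) (m : Int), 0 ≤ m → pvLoopA m m f = pvGoB m f := by
  intro f
  induction f with
  | zero => intro m _; rfl
  | succ f ih =>
      intro m hm
      rw [pvLoopA_succ, pvGoB_succ, wsum_eq hm]
      by_cases h : pvDigLoop 0 m 1 (m.toNat + 1) = m
      · rw [if_pos h.symm, if_pos h]; exact h.symm
      · rw [if_neg (fun e => h e.symm), if_neg h]
        exact ih _ (wsumB_nonneg hm)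

theorem pvGoB_zero_succ (f : Nat) : pvGoB 0 (f + 1) = 0 := by
  rw [pvGoB_succ, show pvDigLoop 0 0 1 ((0 : Int).toNat + 1) = 0 from rfl]
  simp

-- ===== VERDICT (by name: the statement is the Claim_ definition above) =====
theorem thirt_spec : Claim_equal_thirt := by
  intro n _ hn
  unfold Spec_thirt thirt thirt_alt
  rw [show n.toNat + 2 = (n.toNat + 1) + 1 from rfl, pvLoopA_succ, pvGoB_succ, wsum_eq hn]
  by_cases hfix : pvDigLoop 0 n 1 (n.toNat + 1) = n
  · rw [if_pos hfix]
    by_cases h0 : (0 : Int) = pvDigLoop 0 n 1 (n.toNat + 1)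
    · rw [if_pos h0]; exact h0
    · rw [if_neg h0, pvLoopA_eq_pvGoB _ _ (wsumB_nonneg hn)]
      conv_lhs => rw [hfix]
      rw [pvGoB_succ, if_pos hfix]
  · rw [if_neg hfix]
    by_cases h0 : (0 : Int) = pvDigLoop 0 n 1 (n.toNat + 1)
    · rw [if_pos h0, ← h0]
      exact (pvGoB_zero_succ n.toNat).symm
    · rw [if_neg h0]
      exact pvLoopA_eq_pvGoB _ _ (wsumB_nonneg hn)
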